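-- pv_equiv track=rewrite | github.com/SvetlaGeorgieva/HackBulgaria-Programming101 | week0day2/34_sudoku_solved/solution.py | subgrid
-- ===== SOURCE A (Python) =====
-- def subgrid(a,b, sudoku):
--     arr_ab = {1:0, 2:0, 3:0, 4:0, 5:0, 6:0, 7:0, 8:0, 9:0}
--     list_ab = []
--     for i in range(3):
--         for j in range(3):
--             num = sudoku[a+i][b+j]
--             list_ab.append(num)
--     for num in list_ab:
--         if num in arr_ab:
--             arr_ab[num] += 1
--     return arr_ab
-- ===== SOURCE B (Python) =====
-- def subgrid(a, b, sudoku):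
--     # dict comprehension: for each digit 1..9, count matching cells of the 3x3 block
--     return {d: sum(1 for i in range(3) for j in range(3) if sudoku[a + i][b + j] == d)
--             for d in range(1, 10)}
-- ===== Notes on version B (the rewrite author's own statement) =====
-- stated objective: simpler
-- what changed: B is a single dict comprehension over digits 1..9 that counts matching cells per digit, instead of A's collect-cells-into-a-list pass followed by a bucketing pass over a pre-built zero dict.
import Mathlib
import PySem

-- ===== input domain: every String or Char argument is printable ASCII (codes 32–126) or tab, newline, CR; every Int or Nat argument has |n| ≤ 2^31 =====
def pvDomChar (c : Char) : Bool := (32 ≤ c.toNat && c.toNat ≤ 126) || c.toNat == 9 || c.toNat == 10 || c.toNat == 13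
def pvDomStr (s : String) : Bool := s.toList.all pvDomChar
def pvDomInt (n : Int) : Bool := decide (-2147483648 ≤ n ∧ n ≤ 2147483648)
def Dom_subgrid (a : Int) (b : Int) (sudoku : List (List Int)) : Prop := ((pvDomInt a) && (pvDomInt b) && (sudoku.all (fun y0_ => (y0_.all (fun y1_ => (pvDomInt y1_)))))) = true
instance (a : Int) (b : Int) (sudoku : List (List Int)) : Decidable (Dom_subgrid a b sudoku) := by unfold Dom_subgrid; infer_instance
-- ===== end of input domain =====

-- B replaces A's collect-then-bucket two-pass dict build with a single per-digit
-- counting comprehension over the nine cells (objective: simpler).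

-- ===== PORT A =====
def subgrid (a : Int) (b : Int) (sudoku : List (List Int)) : List (Int × Int) :=
  let arr_ab : PySem.Dict Int Int :=
    PySem.Dict.ofList [(1,0),(2,0),(3,0),(4,0),(5,0),(6,0),(7,0),(8,0),(9,0)]
  let list_ab : List Int :=
    (PySem.List.pyRange 0 3 1).foldl (fun acc i =>
      (PySem.List.pyRange 0 3 1).foldl (fun acc j =>
        acc ++ [PySem.List.pyGetD (PySem.List.pyGetD sudoku (a + i) []) (b + j) 0]) acc) []
  let arr := list_ab.foldl (fun d num =>
      if d.contains num then d.modify num 0 (· + 1) else d) arr_ab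
  arr.items

-- ===== PORT B =====
def subgrid_alt (a : Int) (b : Int) (sudoku : List (List Int)) : List (Int × Int) :=
  (PySem.List.pyRange 1 10 1).map (fun d =>
    (d, (PySem.List.pyRange 0 3 1).foldl (fun s i =>
          (PySem.List.pyRange 0 3 1).foldl (fun s j =>
            s + (if PySem.List.pyGetD (PySem.List.pyGetD sudoku (a + i) []) (b + j) 0 = d
                 then 1 else 0)) s) 0))

-- ===== PRECONDITION & SPEC =====
-- Pre_ = exactly the inputs where all nine lookups sudoku[a+i][b+j] succeed (Python's
-- negative-index wraparound included); elsewhere the Python A raises IndexError.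
def Pre_subgrid (a : Int) (b : Int) (sudoku : List (List Int)) : Prop :=
  (([0,1,2] : List Int).all (fun i =>
    match PySem.List.pyGet? sudoku (a + i) with
    | some row => ([0,1,2] : List Int).all (fun j => (PySem.List.pyGet? row (b + j)).isSome)
    | none => false)) = true
instance (a : Int) (b : Int) (sudoku : List (List Int)) : Decidable (Pre_subgrid a b sudoku) := by unfold Pre_subgrid; infer_instance

def pvWitness_subgrid : Int × Int × List (List Int) :=
  (0, 0, [[1, 2, 3], [4, 5, 6], [7, 8, 9]])

def Spec_subgrid (a : Int) (b : Int) (sudoku : List (List Int)) (out : List (Int × Int)) : Prop := out = subgrid_alt a b sudoku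
instance (a : Int) (b : Int) (sudoku : List (List Int)) (out : List (Int × Int)) : Decidable (Spec_subgrid a b sudoku out) := by unfold Spec_subgrid; infer_instance

-- ===== CLAIM (what is proved, stated in full; the proofs are below) =====
def Claim_equal_subgrid : Prop := ∀ (a : Int) (b : Int) (sudoku : List (List Int)), Dom_subgrid a b sudoku → Pre_subgrid a b sudoku → Spec_subgrid a b sudoku (subgrid a b sudoku)

-- ===== LEMMAS AND PROOFS =====

-- the fixed key list 1..9 of A's initial dict
def pvKs : List Int := [1,2,3,4,5,6,7,8,9]

-- A's counting step
def pvStep (d : PySem.Dict Int Int) (num : Int) : PySem.Dict Int Int :=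
  if d.contains num then d.modify num 0 (· + 1) else d

lemma pv_getD_mk_map (ks : List Int) (c : Int → Int) (num : Int) (h : num ∈ ks) :
    (PySem.Dict.mk (ks.map (fun k => (k, c k)))).getD num 0 = c num := by
  induction ks with
  | nil => cases h
  | cons k ks ih =>
    simp only [List.map_cons, PySem.Dict.getD, PySem.Dict.get?]
    by_cases hk : k = num
    · subst hk; simp
    · simp only [List.find?_cons]
      have hb : (k == num) = false := by simpa using hk
      simp only [hb]
      have h' : num ∈ ks := by
        rcases List.mem_cons.mp h with h2 | h2
        · exact absurd h2.symm hk
        · exact h2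
      simpa [PySem.Dict.getD, PySem.Dict.get?] using ih h'

lemma pv_contains_mk_map (ks : List Int) (c : Int → Int) (num : Int) :
    (PySem.Dict.mk (ks.map (fun k => (k, c k)))).contains num = decide (num ∈ ks) := by
  induction ks with
  | nil => simp [PySem.Dict.contains]
  | cons k ks ih =>
    simp only [List.map_cons, PySem.Dict.contains, List.any_cons] at ih ⊢
    by_cases h : k = num
    · simp [h]
    · have hb : (k == num) = false := by simpa using h
      simp [hb, ih, Ne.symm h]

lemma pv_step_mem (c : Int → Int) (num : Int) (h : num ∈ pvKs) :
    pvStep (PySem.Dict.mk (pvKs.map (fun k => (k, c k)))) num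
      = PySem.Dict.mk (pvKs.map (fun k => (k, if k = num then c k + 1 else c k))) := by
  have hc : (PySem.Dict.mk (pvKs.map (fun k => (k, c k)))).contains num = true := by
    rw [pv_contains_mk_map]; simpa using h
  simp only [pvStep, hc, if_pos, PySem.Dict.modify, PySem.Dict.insert,
    pv_getD_mk_map pvKs c num h, List.map_map]
  congr 1
  apply List.map_congr_left
  intro k _
  by_cases hk : k = num
  · subst hk; simp
  · have : (k == num) = false := by simpa using hk
    simp [Function.comp, this, hk]

lemma pv_step_notmem (c : Int → Int) (num : Int) (h : num ∉ pvKs) :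
    pvStep (PySem.Dict.mk (pvKs.map (fun k => (k, c k)))) num
      = PySem.Dict.mk (pvKs.map (fun k => (k, c k))) := by
  have hc : (PySem.Dict.mk (pvKs.map (fun k => (k, c k)))).contains num = false := by
    rw [pv_contains_mk_map]; simpa using h
  simp [pvStep, hc]

lemma pv_foldA_items (xs : List Int) : ∀ c : Int → Int,
    (xs.foldl pvStep (PySem.Dict.mk (pvKs.map (fun k => (k, c k))))).items
      = pvKs.map (fun k => (k, c k + (xs.count k : Int))) := by
  induction xs with
  | nil => intro c; simp
  | cons num xs ih =>
    intro c
    by_cases h : num ∈ pvKs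
    · rw [List.foldl_cons, pv_step_mem c num h,
        ih (fun k => if k = num then c k + 1 else c k)]
      apply List.map_congr_left
      intro k _
      have : (num :: xs).count k = xs.count k + (if k = num then 1 else 0) := by
        by_cases hk2 : k = num
        · subst hk2; simp
        · rw [List.count_cons]; simp [hk2, Ne.symm hk2]
      rw [this]
      by_cases hk : k = num <;> simp [hk] <;> ring
    · rw [List.foldl_cons, pv_step_notmem c num h, ih c]
      apply List.map_congr_left
      intro k hk
      have hkn : k ≠ num := fun e => h (e ▸ hk)
      have : (num :: xs).count k = xs.count k := by
        rw [List.count_cons]; simp [Ne.symm hkn]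
      rw [this]

lemma pv_countfold (xs : List Int) (d : Int) : ∀ s : Int,
    xs.foldl (fun s x => s + (if x = d then 1 else 0)) s = s + (xs.count d : Int) := by
  induction xs with
  | nil => intro s; simp
  | cons x xs ih =>
    intro s
    rw [List.foldl_cons, ih]
    have : (x :: xs).count d = xs.count d + (if x = d then 1 else 0) := by
      by_cases hx : x = d
      · subst hx; simp
      · rw [List.count_cons]; simp [hx]
    rw [this]
    by_cases hx : x = d <;> simp [hx] <;> ring

-- ===== VERDICT (by name: the statement is the Claim_ definition above) =====
theorem subgrid_spec : Claim_equal_subgrid := by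
  intro a b sudoku _ _
  unfold Spec_subgrid subgrid subgrid_alt
  -- the nine cells of the block, in A's traversal order
  set g : Int → Int → Int :=
    fun i j => PySem.List.pyGetD (PySem.List.pyGetD sudoku (a + i) []) (b + j) 0 with hg
  have hcells :
      (PySem.List.pyRange 0 3 1).foldl (fun acc i =>
        (PySem.List.pyRange 0 3 1).foldl (fun acc j =>
          acc ++ [PySem.List.pyGetD (PySem.List.pyGetD sudoku (a + i) []) (b + j) 0]) acc) []
      = [g 0 0, g 0 1, g 0 2, g 1 0, g 1 1, g 1 2, g 2 0, g 2 1, g 2 2] := by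
    rfl
  have h0 :
      PySem.Dict.ofList [((1:Int),(0:Int)),(2,0),(3,0),(4,0),(5,0),(6,0),(7,0),(8,0),(9,0)]
        = PySem.Dict.mk (pvKs.map (fun k => (k, (fun _ : Int => (0:Int)) k))) := by
    decide
  rw [hcells, h0]
  have hA := pv_foldA_items
    [g 0 0, g 0 1, g 0 2, g 1 0, g 1 1, g 1 2, g 2 0, g 2 1, g 2 2] (fun _ => (0:Int))
  rw [show ([g 0 0, g 0 1, g 0 2, g 1 0, g 1 1, g 1 2, g 2 0, g 2 1, g 2 2].foldl
      (fun d num => if d.contains num then d.modify num 0 (· + 1) else d)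
      (PySem.Dict.mk (pvKs.map (fun k => (k, (fun _ : Int => (0:Int)) k))))).items
    = ([g 0 0, g 0 1, g 0 2, g 1 0, g 1 1, g 1 2, g 2 0, g 2 1, g 2 2].foldl pvStep
      (PySem.Dict.mk (pvKs.map (fun k => (k, (fun _ : Int => (0:Int)) k))))).items from rfl,
    hA]
  rw [show PySem.List.pyRange 1 10 1 = pvKs from rfl]
  apply List.map_congr_left
  intro d _
  have hB :
      (PySem.List.pyRange 0 3 1).foldl (fun (s : Int) i =>
        (PySem.List.pyRange 0 3 1).foldl (fun (s : Int) j =>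
          s + (if PySem.List.pyGetD (PySem.List.pyGetD sudoku (a + i) []) (b + j) 0 = d
               then 1 else 0)) s) 0
      = [g 0 0, g 0 1, g 0 2, g 1 0, g 1 1, g 1 2, g 2 0, g 2 1, g 2 2].foldl
          (fun (s : Int) x => s + (if x = d then 1 else 0)) 0 := by
    rfl
  exact congrArg (fun t => ((d : Int), t))
    ((hB.trans (pv_countfold [g 0 0, g 0 1, g 0 2, g 1 0, g 1 1, g 1 2, g 2 0, g 2 1, g 2 2] d 0))).symm
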